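-- pv_equiv track=rewrite | github.com/E-Aho/AdventOfCode2020 | Days/07/Day07.py | get_inner_colours
-- ===== SOURCE A (Python) =====
-- def get_inner_colours(input_map: dict, colour: str, all_colours = None):
--     if all_colours is None:
--         all_colours = []
--     if colour in input_map and len(input_map[colour]) > 0:
--         for inner_colour in input_map[colour]:
--             all_colours.append(inner_colour["colour"])
--             all_colours += [x for x in get_inner_colours(input_map=input_map, colour=inner_colour["colour"])]
--     return all_colours
-- ===== SOURCE B (Python) =====
-- def get_inner_colours(input_map: dict, colour: str, all_colours=None):
--     # DP over the DAG: compute each colour's full inner listing once, memoized.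
--     memo = {}
--
--     def listing(c):
--         if c in memo:
--             return memo[c]
--         res = []
--         for entry in input_map.get(c, []):
--             child = entry["colour"]
--             res.append(child)
--             res.extend(listing(child))
--         memo[c] = res
--         return res
--
--     result = listing(colour)
--     if all_colours is None:
--         return list(result)
--     all_colours += result
--     return all_colours
-- ===== Notes on version B (the rewrite author's own statement) =====
-- stated objective: alternative
-- what changed: B replaces A's naive recursion, which re-expands every shared sub-bag each time it is reached, by a single memoized DP over the colour DAG that computes each colour's full inner listing once (intended as an asymptotic win on sharing-heavy DAGs; a timing run did not measure a 1.5x win on its generated inputs, so no speed is claimed); return-value equivalence only: A extends a caller-supplied all_colours list in place, and B performs the same in-place extension.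
import Mathlib
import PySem

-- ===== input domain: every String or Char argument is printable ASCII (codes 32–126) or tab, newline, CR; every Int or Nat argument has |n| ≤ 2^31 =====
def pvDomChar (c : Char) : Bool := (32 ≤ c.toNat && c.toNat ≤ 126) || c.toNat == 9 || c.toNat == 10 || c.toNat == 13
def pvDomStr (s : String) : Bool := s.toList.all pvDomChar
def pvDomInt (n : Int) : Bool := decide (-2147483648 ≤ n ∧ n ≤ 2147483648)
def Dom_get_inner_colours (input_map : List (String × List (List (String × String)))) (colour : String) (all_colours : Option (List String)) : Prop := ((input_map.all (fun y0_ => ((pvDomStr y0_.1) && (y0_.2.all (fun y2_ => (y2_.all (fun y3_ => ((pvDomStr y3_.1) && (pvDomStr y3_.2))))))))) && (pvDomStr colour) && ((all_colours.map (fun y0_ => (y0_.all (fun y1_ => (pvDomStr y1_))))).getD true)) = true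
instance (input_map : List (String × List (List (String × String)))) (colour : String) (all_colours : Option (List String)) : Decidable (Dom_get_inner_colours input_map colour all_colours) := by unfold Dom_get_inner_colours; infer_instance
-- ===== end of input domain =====

-- B computes each colour's full inner listing once via a memoized DP over the colour DAG,
-- instead of A's repeated recursive re-expansion of shared sub-bags; return-value equivalence
-- only: A appends to a caller-supplied `all_colours` list in place, B extends it the same way.

-- Shared Python-primitive helpers (dict construction and the entry["colour"] lookup).
def pvMap (input_map : List (String × List (List (String × String)))) :
    PySem.Dict String (List (List (String × String))) :=
  PySem.Dict.ofList input_map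

-- entry["colour"]; Python raises KeyError when the key is missing — those inputs (when the
-- entry is reachable) are outside Pre_get_inner_colours, the "" default is never observed there.
def pvChild (e : List (String × String)) : String :=
  ((PySem.Dict.ofList e).get? "colour").getD ""

-- ===== PORT A =====
-- A's recursion, with a fuel guard that only makes it total; under Pre_ the fuel
-- input_map.length + 1 is never exhausted.
def aRec (input_map : List (String × List (List (String × String)))) :
    Nat → String → List String → List String
  | 0, _, all_colours => all_colours
  | fuel+1, colour, all_colours =>
    match (pvMap input_map).get? colour with
    | some entries =>
        if 0 < entries.length then
          entries.foldl
            (fun acc e => acc ++ [pvChild e] ++ aRec input_map fuel (pvChild e) []) all_colours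
        else all_colours
    | none => all_colours

def get_inner_colours (input_map : List (String × List (List (String × String)))) (colour : String) (all_colours : Option (List String)) : List String :=
  aRec input_map (input_map.length + 1) colour (all_colours.getD [])

-- ===== PORT B =====
-- B's memoized DP: bRec returns (updated memo, full inner listing of c); same fuel guard.
def bRec (input_map : List (String × List (List (String × String)))) :
    Nat → String → PySem.Dict String (List String) →
      PySem.Dict String (List String) × List String
  | 0, _, memo => (memo, [])
  | fuel+1, c, memo =>
    match memo.get? c with
    | some v => (memo, v)
    | none =>
      let st := (((pvMap input_map).get? c).getD []).foldl
        (fun (st : PySem.Dict String (List String) × List String) e =>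
          let q := bRec input_map fuel (pvChild e) st.1
          (q.1, st.2 ++ [pvChild e] ++ q.2)) (memo, [])
      (st.1.insert c st.2, st.2)

def get_inner_colours_alt (input_map : List (String × List (List (String × String)))) (colour : String) (all_colours : Option (List String)) : List String :=
  all_colours.getD [] ++ (bRec input_map (input_map.length + 1) colour PySem.Dict.empty).2

-- ===== PRECONDITION & SPEC =====
-- The colour graph of the map: keys, the children of a colour, and the bounded transitive
-- closure of the child relation (saturates within input_map.length + 1 rounds).
def pvChildF (input_map : List (String × List (List (String × String)))) (c : String) :
    Finset String :=
  ((((pvMap input_map).get? c).getD []).map pvChild).toFinset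

def pvGrow (input_map : List (String × List (List (String × String))))
    (S : Finset String) : Finset String :=
  S ∪ S.biUnion (pvChildF input_map)

-- all colours reachable from c in at least one step (bounded closure of the edge relation)
def pvDesc (input_map : List (String × List (List (String × String)))) (c : String) :
    Finset String :=
  (pvGrow input_map)^[input_map.length + 1] (pvChildF input_map c)

-- all colours reachable from c (including c itself)
def pvRch (input_map : List (String × List (List (String × String)))) (c : String) :
    Finset String :=
  insert c (pvDesc input_map c)

-- Pre_ = exactly the inputs on which Python A returns normally: no colour reachable from
-- `colour` lies on a cycle of the child relation (else A raises RecursionError), and every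
-- entry dict of a reachable colour carries the "colour" key (else A raises KeyError).
def Pre_get_inner_colours (input_map : List (String × List (List (String × String)))) (colour : String) (all_colours : Option (List String)) : Prop :=
  (∀ c ∈ pvRch input_map colour, c ∉ pvDesc input_map c) ∧
  (∀ c ∈ pvRch input_map colour, ∀ e ∈ ((pvMap input_map).get? c).getD [],
    ((PySem.Dict.ofList e).get? "colour").isSome = true)

instance (input_map : List (String × List (List (String × String)))) (colour : String) (all_colours : Option (List String)) : Decidable (Pre_get_inner_colours input_map colour all_colours) := by
  unfold Pre_get_inner_colours; infer_instance

def pvWitness_get_inner_colours : (List (String × List (List (String × String)))) × String × Option (List String) :=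
  ([("a", [[("colour", "b")], [("colour", "c")]]), ("b", [[("colour", "c")]]), ("c", [])], "a", none)

def Spec_get_inner_colours (input_map : List (String × List (List (String × String)))) (colour : String) (all_colours : Option (List String)) (out : List String) : Prop := out = get_inner_colours_alt input_map colour all_colours
instance (input_map : List (String × List (List (String × String)))) (colour : String) (all_colours : Option (List String)) (out : List String) : Decidable (Spec_get_inner_colours input_map colour all_colours out) := by unfold Spec_get_inner_colours; infer_instance

-- ===== CLAIM (what is proved, stated in full; the proofs are below) =====
def Claim_equal_get_inner_colours : Prop := ∀ (input_map : List (String × List (List (String × String)))) (colour : String) (all_colours : Option (List String)), Dom_get_inner_colours input_map colour all_colours → Pre_get_inner_colours input_map colour all_colours → Spec_get_inner_colours input_map colour all_colours (get_inner_colours input_map colour all_colours)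

-- ===== LEMMAS AND PROOFS =====

def pvKeys (input_map : List (String × List (List (String × String)))) : Finset String :=
  ((pvMap input_map).items.map Prod.fst).toFinset

-- number of keys reachable from c (including c itself if it is a key): the recursion measure
def pvRank (input_map : List (String × List (List (String × String)))) (c : String) : Nat :=
  ((insert c (pvDesc input_map c)) ∩ pvKeys input_map).card

lemma pv_foldl_insert_size {κ ν : Type} [BEq κ] (l : List (κ × ν)) :
    ∀ d : PySem.Dict κ ν, (l.foldl (fun d p => d.insert p.1 p.2) d).size ≤ d.size + l.length := by
  induction l with
  | nil => intro d; simp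
  | cons p t ih =>
    intro d
    have h := ih (d.insert p.1 p.2)
    have hs := PySem.Dict.size_insert d p.1 p.2
    simp only [List.foldl_cons, List.length_cons]
    split at hs <;> omega

lemma pv_size_ofList_le {κ ν : Type} [BEq κ] (l : List (κ × ν)) :
    (PySem.Dict.ofList l).items.length ≤ l.length := by
  have h := pv_foldl_insert_size l (PySem.Dict.empty)
  have he : PySem.Dict.ofList l = l.foldl (fun d p => d.insert p.1 p.2) (PySem.Dict.empty (κ := κ) (ν := ν)) := rfl
  rw [he]
  simpa [PySem.Dict.size, PySem.Dict.empty] using h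

-- a colour with entries is a key
lemma pv_mem_keys_of_get? {input_map : List (String × List (List (String × String)))}
    {c : String} {v : List (List (String × String))}
    (h : (pvMap input_map).get? c = some v) : c ∈ pvKeys input_map := by
  have hmem : (c, v) ∈ (pvMap input_map).items := PySem.Dict.mem_items_of_get?_eq_some _ h
  unfold pvKeys
  rw [List.mem_toFinset]
  exact List.mem_map.2 ⟨(c, v), hmem, rfl⟩

lemma pv_childF_empty_of_not_key {input_map : List (String × List (List (String × String)))}
    {c : String} (h : c ∉ pvKeys input_map) : pvChildF input_map c = ∅ := by
  unfold pvChildF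
  cases hE : (pvMap input_map).get? c with
  | none => simp
  | some v => exact absurd (pv_mem_keys_of_get? hE) h

lemma pv_grow_mono (input_map : List (String × List (List (String × String))))
    {S T : Finset String} (h : S ⊆ T) : pvGrow input_map S ⊆ pvGrow input_map T :=
  Finset.union_subset_union h (Finset.biUnion_subset_biUnion_of_subset_left _ h)

lemma pv_subset_grow (input_map : List (String × List (List (String × String))))
    (S : Finset String) : S ⊆ pvGrow input_map S := Finset.subset_union_left

lemma pv_biUnion_key_congr (input_map : List (String × List (List (String × String))))
    {S T : Finset String} (h : S ∩ pvKeys input_map = T ∩ pvKeys input_map) :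
    S.biUnion (pvChildF input_map) = T.biUnion (pvChildF input_map) := by
  have hdir : ∀ {U V : Finset String}, U ∩ pvKeys input_map = V ∩ pvKeys input_map →
      U.biUnion (pvChildF input_map) ⊆ V.biUnion (pvChildF input_map) := by
    intro U V hUV x hx
    obtain ⟨c, hcU, hxc⟩ := Finset.mem_biUnion.1 hx
    by_cases hk : c ∈ pvKeys input_map
    · have : c ∈ V ∩ pvKeys input_map := by
        rw [← hUV]; exact Finset.mem_inter.2 ⟨hcU, hk⟩
      exact Finset.mem_biUnion.2 ⟨c, (Finset.mem_inter.1 this).1, hxc⟩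
    · rw [pv_childF_empty_of_not_key hk] at hxc
      exact absurd hxc (Finset.notMem_empty x)
  exact Finset.Subset.antisymm (hdir h) (hdir h.symm)

lemma pv_iter_mono (input_map : List (String × List (List (String × String))))
    (S : Finset String) : ∀ {j k : Nat}, j ≤ k →
      (pvGrow input_map)^[j] S ⊆ (pvGrow input_map)^[k] S := by
  intro j k hjk
  induction k with
  | zero => cases Nat.le_zero.1 hjk; rfl
  | succ k ih =>
    rcases Nat.lt_or_ge j (k+1) with h | h
    · have h1 := ih (Nat.lt_succ_iff.1 h)
      have h2 : (pvGrow input_map)^[k] S ⊆ (pvGrow input_map)^[k+1] S := by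
        rw [Function.iterate_succ_apply']
        exact pv_subset_grow input_map _
      exact h1.trans h2
    · have : j = k + 1 := Nat.le_antisymm hjk h
      subst this; rfl

-- saturation: one more growth round past input_map.length + 1 adds nothing
lemma pv_desc_fixed (input_map : List (String × List (List (String × String))))
    (c : String) : pvGrow input_map (pvDesc input_map c) = pvDesc input_map c := by
  set m := input_map.length with hm
  set T : Nat → Finset String := fun k => (pvGrow input_map)^[k] (pvChildF input_map c) with hT
  -- pigeonhole on the key part of the chain
  have hstrict : ∀ k : Nat, (∀ j, j < k → T j ∩ pvKeys input_map ≠ T (j+1) ∩ pvKeys input_map) →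
      k ≤ (T k ∩ pvKeys input_map).card := by
    intro k
    induction k with
    | zero => intro _; exact Nat.zero_le _
    | succ k ih =>
      intro h
      have h1 := ih (fun j hj => h j (Nat.lt_succ_of_lt hj))
      have hsub : T k ∩ pvKeys input_map ⊆ T (k+1) ∩ pvKeys input_map :=
        Finset.inter_subset_inter_right (pv_iter_mono input_map _ (Nat.le_succ k))
      have hne := h k (Nat.lt_succ_self k)
      have := Finset.card_lt_card (Finset.ssubset_iff_subset_ne.2 ⟨hsub, hne⟩)
      omega
  have hKcard : (pvKeys input_map).card ≤ m := by
    have h1 : (pvKeys input_map).card ≤ ((pvMap input_map).items.map Prod.fst).length :=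
      List.toFinset_card_le _
    have h2 := pv_size_ofList_le input_map
    simp only [List.length_map, pvMap] at h1
    omega
  have hex : ∃ j, j ≤ m ∧ T j ∩ pvKeys input_map = T (j+1) ∩ pvKeys input_map := by
    by_contra hno
    push Not at hno
    have hall : ∀ j, j < m + 1 → T j ∩ pvKeys input_map ≠ T (j+1) ∩ pvKeys input_map := by
      intro j hj
      exact hno j (Nat.lt_succ_iff.1 hj)
    have h1 := hstrict (m+1) hall
    have h2 : (T (m+1) ∩ pvKeys input_map).card ≤ (pvKeys input_map).card :=
      Finset.card_le_card Finset.inter_subset_right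
    omega
  obtain ⟨j, hjm, hjeq⟩ := hex
  have hstep : T (j+2) = T (j+1) := by
    have he : T (j+2) = pvGrow input_map (T (j+1)) := by
      simp only [hT, Function.iterate_succ_apply']
    rw [he]
    unfold pvGrow
    rw [pv_biUnion_key_congr input_map hjeq.symm]
    apply Finset.Subset.antisymm
    · apply Finset.union_subset subset_rfl
      have : (T j).biUnion (pvChildF input_map) ⊆ pvGrow input_map (T j) :=
        Finset.subset_union_right
      have he2 : pvGrow input_map (T j) = T (j+1) := by
        simp only [hT, Function.iterate_succ_apply']
      rw [he2] at this
      exact this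
    · exact Finset.subset_union_left
  have hstab : ∀ i, T (j+1) = T (j+1+i) := by
    intro i
    induction i with
    | zero => rfl
    | succ i ih =>
      have he : T (j+1+i+1) = pvGrow input_map (T (j+1+i)) := by
        simp only [hT, Function.iterate_succ_apply']
      have he2 : T (j+2) = pvGrow input_map (T (j+1)) := by
        simp only [hT, Function.iterate_succ_apply']
      have : T (j+1+i+1) = T (j+2) := by rw [he, ← ih, ← he2]
      rw [show j+1+(i+1) = j+1+i+1 from rfl, this, hstep, ih]
  have hdesc : pvDesc input_map c = T (m+1) := rfl
  have h1 : T (m+1) = T (j+1) := by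
    have := hstab (m - j)
    rw [show j + 1 + (m - j) = m + 1 by omega] at this
    exact this.symm
  rw [hdesc, h1]
  have he2 : pvGrow input_map (T (j+1)) = T (j+2) := by
    simp only [hT, Function.iterate_succ_apply']
  rw [he2, hstep]

lemma pv_childF_subset_desc (input_map : List (String × List (List (String × String))))
    (c : String) : pvChildF input_map c ⊆ pvDesc input_map c :=
  pv_iter_mono input_map _ (Nat.zero_le _)

lemma pv_childF_mem_desc (input_map : List (String × List (List (String × String))))
    {c d : String} (hd : d ∈ pvDesc input_map c) :
    pvChildF input_map d ⊆ pvDesc input_map c := by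
  intro x hx
  have h1 : x ∈ (pvDesc input_map c).biUnion (pvChildF input_map) :=
    Finset.mem_biUnion.2 ⟨d, hd, hx⟩
  have h2 : (pvDesc input_map c).biUnion (pvChildF input_map) ⊆
      pvGrow input_map (pvDesc input_map c) := Finset.subset_union_right
  rw [pv_desc_fixed] at h2
  exact h2 h1

lemma pv_desc_trans (input_map : List (String × List (List (String × String))))
    {c d : String} (hd : d ∈ pvDesc input_map c) :
    pvDesc input_map d ⊆ pvDesc input_map c := by
  have hstep : ∀ k, (pvGrow input_map)^[k] (pvChildF input_map d) ⊆ pvDesc input_map c := by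
    intro k
    induction k with
    | zero => exact pv_childF_mem_desc input_map hd
    | succ k ih =>
      rw [Function.iterate_succ_apply']
      have := pv_grow_mono input_map ih
      rw [pv_desc_fixed] at this
      exact this
  exact hstep (input_map.length + 1)

-- the central consequence of Pre_: a child of a reachable colour is reachable and smaller
lemma pv_pre_child (input_map : List (String × List (List (String × String))))
    (colour : String) (ac : Option (List String))
    (hpre : Pre_get_inner_colours input_map colour ac)
    {c : String} {entries : List (List (String × String))} {e : List (String × String)}
    (hc : c ∈ pvRch input_map colour) (hE : (pvMap input_map).get? c = some entries)
    (he : e ∈ entries) :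
    pvChild e ∈ pvRch input_map colour ∧ pvRank input_map (pvChild e) < pvRank input_map c := by
  have hchild : pvChild e ∈ pvChildF input_map c := by
    unfold pvChildF
    rw [hE, Option.getD_some, List.mem_toFinset]
    exact List.mem_map.2 ⟨e, he, rfl⟩
  have hcsub : pvChildF input_map c ⊆ pvDesc input_map colour := by
    rcases Finset.mem_insert.1 hc with rfl | hcd
    · exact pv_childF_subset_desc input_map c
    · exact pv_childF_mem_desc input_map hcd
  have hdR : pvChild e ∈ pvRch input_map colour :=
    Finset.mem_insert_of_mem (hcsub hchild)
  refine ⟨hdR, ?_⟩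
  have hck : c ∈ pvKeys input_map := pv_mem_keys_of_get? hE
  have hdc : pvChild e ∈ pvDesc input_map c := pv_childF_subset_desc input_map c hchild
  have hacyc : c ∉ pvDesc input_map c := hpre.1 c hc
  -- insert (pvChild e) (desc (pvChild e)) ⊆ desc c
  have hsub : insert (pvChild e) (pvDesc input_map (pvChild e)) ⊆ pvDesc input_map c := by
    apply Finset.insert_subset hdc
    exact pv_desc_trans input_map hdc
  have hsub2 : insert (pvChild e) (pvDesc input_map (pvChild e)) ∩ pvKeys input_map ⊆
      insert c (pvDesc input_map c) ∩ pvKeys input_map :=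
    Finset.inter_subset_inter_right (hsub.trans (Finset.subset_insert c _))
  have hcmem : c ∈ insert c (pvDesc input_map c) ∩ pvKeys input_map :=
    Finset.mem_inter.2 ⟨Finset.mem_insert_self c _, hck⟩
  have hcnot : c ∉ insert (pvChild e) (pvDesc input_map (pvChild e)) ∩ pvKeys input_map := by
    intro hcon
    exact hacyc (hsub (Finset.mem_inter.1 hcon).1)
  unfold pvRank
  exact Finset.card_lt_card (Finset.ssubset_iff_of_subset hsub2 |>.2 ⟨c, hcmem, hcnot⟩)

lemma pv_rank_le (input_map : List (String × List (List (String × String))))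
    (c : String) : pvRank input_map c ≤ input_map.length := by
  have h1 : pvRank input_map c ≤ (pvKeys input_map).card :=
    Finset.card_le_card Finset.inter_subset_right
  have h2 : (pvKeys input_map).card ≤ ((pvMap input_map).items.map Prod.fst).length :=
    List.toFinset_card_le _
  have h3 := pv_size_ofList_le input_map
  simp only [List.length_map, pvMap] at h2
  omega

lemma pv_astab (input_map : List (String × List (List (String × String))))
    (colour : String) (ac : Option (List String))
    (hpre : Pre_get_inner_colours input_map colour ac) :
    ∀ f c acc, c ∈ pvRch input_map colour → pvRank input_map c < f →
      aRec input_map f c acc = acc ++ aRec input_map (pvRank input_map c + 1) c [] := by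
  intro f
  induction f using Nat.strong_induction_on with
  | _ f IH =>
    intro c acc hc hf
    obtain ⟨f', rfl⟩ : ∃ f', f = f' + 1 := ⟨f - 1, by omega⟩
    cases hE : (pvMap input_map).get? c with
    | none => simp [aRec, hE]
    | some entries =>
      by_cases hlen : 0 < entries.length
      · have hfold : ∀ fu, pvRank input_map c ≤ fu → fu < f' + 1 → ∀ a : List String,
            entries.foldl (fun acc e => acc ++ [pvChild e] ++ aRec input_map fu (pvChild e) []) a
              = a ++ entries.flatMap
                  (fun e => [pvChild e] ++ aRec input_map (pvRank input_map (pvChild e) + 1) (pvChild e) []) := by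
          intro fu hfu1 hfu2 a
          rw [PySem.List.foldl_congr_mem' entries _
            (fun acc e => acc ++ ([pvChild e] ++ aRec input_map (pvRank input_map (pvChild e) + 1) (pvChild e) []))
            a ?_]
          · exact PySem.List.foldl_append_eq_flatMap _ entries a
          · intro e he a'
            obtain ⟨hr, hlt⟩ := pv_pre_child input_map colour ac hpre hc hE he
            have hrec := IH fu (by omega) (pvChild e) [] hr (by omega)
            simp only [List.nil_append] at hrec
            rw [hrec, List.append_assoc]
        have hA : aRec input_map (f' + 1) c acc = acc ++ entries.flatMap
            (fun e => [pvChild e] ++ aRec input_map (pvRank input_map (pvChild e) + 1) (pvChild e) []) := by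
          simp only [aRec, hE]
          rw [if_pos hlen]
          exact hfold f' (by omega) (by omega) acc
        have hB : aRec input_map (pvRank input_map c + 1) c [] = [] ++ entries.flatMap
            (fun e => [pvChild e] ++ aRec input_map (pvRank input_map (pvChild e) + 1) (pvChild e) []) := by
          simp only [aRec, hE]
          rw [if_pos hlen]
          exact hfold (pvRank input_map c) (by omega) (by omega) []
        rw [hA, hB]
        simp
      · simp [aRec, hE, hlen]

lemma pv_vchar (input_map : List (String × List (List (String × String))))
    (colour : String) (ac : Option (List String))
    (hpre : Pre_get_inner_colours input_map colour ac)
    (c : String) (hc : c ∈ pvRch input_map colour) :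
    aRec input_map (pvRank input_map c + 1) c [] =
      (((pvMap input_map).get? c).getD []).flatMap
        (fun e => pvChild e ::
          aRec input_map (pvRank input_map (pvChild e) + 1) (pvChild e) []) := by
  cases hE : (pvMap input_map).get? c with
  | none => simp [aRec, hE]
  | some entries =>
    by_cases hlen : 0 < entries.length
    · have hL : aRec input_map (pvRank input_map c + 1) c []
          = entries.foldl
              (fun acc e => acc ++ [pvChild e] ++ aRec input_map (pvRank input_map c) (pvChild e) []) [] := by
        simp only [aRec, hE]
        rw [if_pos hlen]
      rw [hL, PySem.List.foldl_congr_mem' entries _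
        (fun acc e => acc ++ ([pvChild e] ++ aRec input_map (pvRank input_map (pvChild e) + 1) (pvChild e) []))
        [] ?_]
      · rw [PySem.List.foldl_append_eq_flatMap]
        simp only [Option.getD_some, List.nil_append, List.singleton_append]
      · intro e he a'
        obtain ⟨hr, hlt⟩ := pv_pre_child input_map colour ac hpre hc hE he
        have hrec := pv_astab input_map colour ac hpre (pvRank input_map c) (pvChild e) [] hr hlt
        simp only [List.nil_append] at hrec
        rw [hrec, List.append_assoc]
    · have hnil : entries = [] := by
        cases entries with
        | nil => rfl
        | cons x t => simp at hlen
      subst hnil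
      simp [aRec, hE]

lemma pv_bstab (input_map : List (String × List (List (String × String))))
    (colour : String) (ac : Option (List String))
    (hpre : Pre_get_inner_colours input_map colour ac) :
    ∀ f c memo, c ∈ pvRch input_map colour → pvRank input_map c < f →
      (∀ k v, memo.get? k = some v → v = aRec input_map (pvRank input_map k + 1) k []) →
      (bRec input_map f c memo).2 = aRec input_map (pvRank input_map c + 1) c [] ∧
      (∀ k v, (bRec input_map f c memo).1.get? k = some v →
        v = aRec input_map (pvRank input_map k + 1) k []) := by
  intro f
  induction f using Nat.strong_induction_on with
  | _ f IH =>
    intro c memo hc hf hinv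
    obtain ⟨f', rfl⟩ : ∃ f', f = f' + 1 := ⟨f - 1, by omega⟩
    cases hM : memo.get? c with
    | some v =>
      refine ⟨?_, ?_⟩
      · simp only [bRec, hM]
        exact hinv c v hM
      · intro k v' h
        simp only [bRec, hM] at h
        exact hinv k v' h
    | none =>
      have hkey : ∀ l : List (List (String × String)),
          (∀ e ∈ l, pvChild e ∈ pvRch input_map colour ∧ pvRank input_map (pvChild e) < f') →
          ∀ (memo0 : PySem.Dict String (List String)) (res : List String),
          (∀ k v, memo0.get? k = some v → v = aRec input_map (pvRank input_map k + 1) k []) →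
          (l.foldl (fun (st : PySem.Dict String (List String) × List String) e =>
              ((bRec input_map f' (pvChild e) st.1).1,
                st.2 ++ [pvChild e] ++ (bRec input_map f' (pvChild e) st.1).2)) (memo0, res)).2
            = res ++ l.flatMap
                (fun e => pvChild e :: aRec input_map (pvRank input_map (pvChild e) + 1) (pvChild e) []) ∧
          (∀ k v, (l.foldl (fun (st : PySem.Dict String (List String) × List String) e =>
              ((bRec input_map f' (pvChild e) st.1).1,
                st.2 ++ [pvChild e] ++ (bRec input_map f' (pvChild e) st.1).2)) (memo0, res)).1.get? k = some v →
            v = aRec input_map (pvRank input_map k + 1) k []) := by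
        intro l
        induction l with
        | nil =>
          intro _ memo0 res hinv0
          exact ⟨by simp, hinv0⟩
        | cons e t iht =>
          intro h memo0 res hinv0
          have he := h e (by simp)
          have hb := IH f' (by omega) (pvChild e) memo0 he.1 he.2 hinv0
          have hstep := iht (fun e' he' => h e' (by simp [he']))
            (bRec input_map f' (pvChild e) memo0).1
            (res ++ [pvChild e] ++ (bRec input_map f' (pvChild e) memo0).2) hb.2
          refine ⟨?_, hstep.2⟩
          rw [List.foldl_cons, hstep.1, hb.1]
          simp
      have hl : ∀ e ∈ ((pvMap input_map).get? c).getD [],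
          pvChild e ∈ pvRch input_map colour ∧ pvRank input_map (pvChild e) < f' := by
        intro e he
        cases hE : (pvMap input_map).get? c with
        | none => rw [hE] at he; simp at he
        | some entries =>
          rw [hE] at he
          simp only [Option.getD_some] at he
          obtain ⟨hr, hlt⟩ := pv_pre_child input_map colour ac hpre hc hE he
          exact ⟨hr, by omega⟩
      have hmain := hkey (((pvMap input_map).get? c).getD []) hl memo [] hinv
      have hval : ((((pvMap input_map).get? c).getD []).foldl
          (fun (st : PySem.Dict String (List String) × List String) e =>
            ((bRec input_map f' (pvChild e) st.1).1,
              st.2 ++ [pvChild e] ++ (bRec input_map f' (pvChild e) st.1).2)) (memo, ([] : List String))).2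
          = aRec input_map (pvRank input_map c + 1) c [] := by
        rw [hmain.1, pv_vchar input_map colour ac hpre c hc]
        simp
      refine ⟨?_, ?_⟩
      · simp only [bRec, hM]
        exact hval
      · intro k v h
        simp only [bRec, hM] at h
        rw [PySem.Dict.get?_insert] at h
        by_cases hkc : k = c
        · rw [if_pos hkc] at h
          cases h
          rw [hkc]
          exact hval
        · rw [if_neg hkc] at h
          exact hmain.2 k v h

-- ===== VERDICT (by name: the statement is the Claim_ definition above) =====
theorem get_inner_colours_spec : Claim_equal_get_inner_colours := by
  intro input_map colour ac _hdom hpre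
  unfold Spec_get_inner_colours get_inner_colours get_inner_colours_alt
  have hrank : pvRank input_map colour < input_map.length + 1 := by
    have := pv_rank_le input_map colour
    omega
  have hcR : colour ∈ pvRch input_map colour := Finset.mem_insert_self _ _
  have hA := pv_astab input_map colour ac hpre (input_map.length + 1) colour
    (ac.getD []) hcR hrank
  have hB := (pv_bstab input_map colour ac hpre (input_map.length + 1) colour
    PySem.Dict.empty hcR hrank (by intro k v h; simp [PySem.Dict.get?_empty] at h)).1
  rw [hA, hB]
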